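-- pv_equiv track=rewrite | github.com/Joshuajxy/HUGE_FreqTrade_Strategy_Collection | freqtrade_backtest_system/components/backtest_config/manager.py | _validate_config_name
-- ===== SOURCE A (Python) =====
-- def _validate_config_name(name: str) -> bool:
--     """Validate configuration name"""
--     if not name or len(name.strip()) == 0:
--         return False
--
--     # Check invalid characters
--     invalid_chars = ['/', '\\', ':', '*', '?', '"', '<', '>', '|']
--     for char in invalid_chars:
--         if char in name:
--             return False
--
--     return True
-- ===== SOURCE B (Python) =====
-- def _validate_config_name(name: str) -> bool:
--     """Validate configuration name"""
--     if not name or len(name.strip()) == 0: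
--         return False
--     # one pass over the name's characters instead of scanning name once per invalid char
--     return all(c not in '/\\:*?"<>|' for c in name)
-- ===== Notes on version B (the rewrite author's own statement) =====
-- stated objective: idiomatic
-- what changed: The fixed-list loop that rescans the whole name once per invalid character is replaced by a single pass over the name's characters with all(), testing each against the invalid-character string.
import Mathlib
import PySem

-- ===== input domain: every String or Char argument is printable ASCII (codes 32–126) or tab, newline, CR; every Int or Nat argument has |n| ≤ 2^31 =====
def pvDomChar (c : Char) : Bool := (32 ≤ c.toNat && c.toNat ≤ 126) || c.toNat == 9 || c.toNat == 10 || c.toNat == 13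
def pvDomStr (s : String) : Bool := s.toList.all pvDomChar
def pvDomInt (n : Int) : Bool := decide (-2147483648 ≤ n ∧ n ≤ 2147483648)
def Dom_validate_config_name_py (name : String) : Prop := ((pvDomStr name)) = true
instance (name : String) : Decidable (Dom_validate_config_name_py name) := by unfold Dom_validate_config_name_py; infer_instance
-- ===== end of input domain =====

-- B replaces A's loop over the fixed invalid-character list (each scanning the whole
-- name) by a single pass over the name's characters; same guard, same result (idiomatic).


-- ===== PORT A =====
-- for char in invalid_chars: if char in name: return False / return True
def pvA_loop (name : List Char) : List Char → Bool
  | [] => true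
  | c :: rest => if name.contains c then false else pvA_loop name rest

def validate_config_name_py (name : String) : Bool :=
  if name.toList = [] ∨ PySem.Chars.len (PySem.Chars.strip name.toList) = 0 then false
  else pvA_loop name.toList ['/', '\\', ':', '*', '?', '"', '<', '>', '|']

-- ===== PORT B =====
def validate_config_name_py_alt (name : String) : Bool :=
  if name.toList = [] ∨ PySem.Chars.len (PySem.Chars.strip name.toList) = 0 then false
  else name.toList.all (fun c => !(("/\\:*?\"<>|" : String).toList.contains c))

-- ===== PRECONDITION & SPEC =====
def Spec_validate_config_name_py (name : String) (out : Bool) : Prop := out = validate_config_name_py_alt name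
instance (name : String) (out : Bool) : Decidable (Spec_validate_config_name_py name out) := by unfold Spec_validate_config_name_py; infer_instance

-- ===== CLAIM (what is proved, stated in full; the proofs are below) =====
def Claim_equal_validate_config_name_py : Prop := ∀ (name : String), Dom_validate_config_name_py name → Spec_validate_config_name_py name (validate_config_name_py name)

-- ===== LEMMAS AND PROOFS =====
theorem pvA_loop_eq_all (n : List Char) (inv : List Char) :
    pvA_loop n inv = inv.all (fun c => !(n.contains c)) := by
  induction inv with
  | nil => rfl
  | cons c rest ih =>
      simp only [pvA_loop, List.all_cons, ih]
      by_cases h : n.contains c = true <;> simp [h]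

theorem all_comm_disjoint (n inv : List Char) :
    inv.all (fun c => !(n.contains c)) = n.all (fun c => !(inv.contains c)) := by
  rw [Bool.eq_iff_iff]
  simp only [List.all_eq_true, Bool.not_eq_true', List.contains_eq_mem, decide_eq_false_iff_not]
  exact ⟨fun h c hc hm => h _ hm hc, fun h c hc hm => h _ hm hc⟩

-- ===== VERDICT (by name: the statement is the Claim_ definition above) =====
theorem validate_config_name_py_spec : Claim_equal_validate_config_name_py := by
  intro name _
  unfold Spec_validate_config_name_py validate_config_name_py validate_config_name_py_alt
  split
  · rfl
  · rw [pvA_loop_eq_all, all_comm_disjoint]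
    have h : ("/\\:*?\"<>|" : String).toList = ['/', '\\', ':', '*', '?', '"', '<', '>', '|'] := rfl
    rw [h]
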